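-- pv_equiv track=rewrite | github.com/1tongp/MH3400_NTU | lab 5/telescope_submitted.py | combin_list
-- ===== SOURCE A (Python) =====
-- from itertools import combinations
--
-- def conflict_check(lst):
--     for i in range(len(lst) - 1):
--
--         if lst[i][1] > lst[i + 1][0]:
--             return False
--     return True
--
-- def combin_list(L, num):
--     combination = combinations(L, num)
--     combination_list = []
--     for i in combination:
--         combination_list.append(list(i))
--     combin_copy = combination_list.copy()
--
--     # check if the combinations are not conflict
--     for i in combination_list:
--         if not conflict_check(i):
--             combin_copy.remove(i)
--
--     return combin_copy
-- ===== SOURCE B (Python) =====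
-- def combin_list(L, num):
--     # Backtracking over the suffix of L: extend a partial combination only while
--     # the adjacency condition last[1] <= cand[0] holds, pruning suffixes too
--     # short to ever complete a size-num combination, instead of generating all
--     # combinations and filtering with list.remove afterwards.
--     if num < 0 or num > len(L):
--         return []
--
--     def bt(chosen, rest):
--         if len(chosen) == num:
--             return [list(chosen)]
--         if not rest:
--             return []
--         c, rs = rest[0], rest[1:]
--         out = []
--         if num - len(chosen) <= len(rest):
--             if not chosen or chosen[-1][1] <= c[0]:
--                 out += bt(chosen + [c], rs)
--         out += bt(chosen, rs)
--         return out
--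
--     return bt([], L)
-- ===== Notes on version B (the rewrite author's own statement) =====
-- stated objective: alternative
-- what changed: Replaces generate-all-combinations-then-filter-with-list.remove (which rescans the copy for each conflicting combination) by pruned suffix backtracking that extends a partial combination only while the adjacency condition last[1] <= cand[0] holds and enough elements remain to complete it, emitting results directly in the same lexicographic order.
import Mathlib
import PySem

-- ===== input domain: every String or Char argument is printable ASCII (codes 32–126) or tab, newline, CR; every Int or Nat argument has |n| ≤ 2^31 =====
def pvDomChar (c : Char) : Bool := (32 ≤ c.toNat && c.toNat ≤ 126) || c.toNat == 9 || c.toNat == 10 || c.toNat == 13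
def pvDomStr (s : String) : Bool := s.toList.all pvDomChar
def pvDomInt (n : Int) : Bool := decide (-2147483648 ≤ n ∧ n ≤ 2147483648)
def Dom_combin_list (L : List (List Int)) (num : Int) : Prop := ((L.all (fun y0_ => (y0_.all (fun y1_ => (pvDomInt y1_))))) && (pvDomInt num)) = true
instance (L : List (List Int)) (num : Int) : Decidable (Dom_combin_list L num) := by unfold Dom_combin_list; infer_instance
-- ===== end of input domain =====

-- B replaces A's generate-all-combinations-then-filter-with-list.remove by pruned suffix backtracking
-- (extend a partial combination only while the adjacency condition holds and enough elements remain),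
-- producing the same lexicographic output order; objective: alternative algorithm, no speed claim.


-- ===== PORT A =====
-- conflict_check: for i in range(len(lst)-1): if lst[i][1] > lst[i+1][0]: return False; return True
-- (.getD [] / .getD 0 are totality guards only; inside Pre_ every access Python performs is in range)
def pvConflictCheck (lst : List (List Int)) : Bool :=
  (PySem.List.pyRange 0 ((lst.length : Int) - 1) 1).all (fun i =>
    !(decide ((PySem.List.pyGet? ((PySem.List.pyGet? lst i).getD []) 1).getD 0 >
              (PySem.List.pyGet? ((PySem.List.pyGet? lst (i + 1)).getD []) 0).getD 0)))

-- itertools.combinations(L, n) in lexicographic order, each tuple as a list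
def pvCombos : Nat → List (List Int) → List (List (List Int))
  | 0, _ => [[]]
  | _ + 1, [] => []
  | n + 1, x :: xs => (pvCombos n xs).map (x :: ·) ++ pvCombos (n + 1) xs

-- num.toNat totalizes: Python raises ValueError for num < 0 (outside Pre_)
def combin_list (L : List (List Int)) (num : Int) : List (List (List Int)) :=
  let combination := pvCombos num.toNat L
  let combination_list := combination.foldl (fun acc i => acc ++ [i]) []
  let combin_copy := combination_list
  combination_list.foldl
    (fun copy i =>
      if !pvConflictCheck i then (PySem.List.remove? copy i).getD copy else copy)
    combin_copy

-- ===== PORT B =====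
-- bt(chosen, rest): recursion over the suffix of L, pruning suffixes too short to complete
def pvBt (num : Int) (chosen : List (List Int)) (rest : List (List Int)) :
    List (List (List Int)) :=
  if (chosen.length : Int) = num then [chosen]
  else
    match rest with
    | [] => []
    | c :: rs =>
      (if decide (num - (chosen.length : Int) ≤ (((c :: rs).length : Nat) : Int)) then
        (if chosen.isEmpty ||
            decide ((PySem.List.pyGet? ((PySem.List.pyGet? chosen (-1)).getD []) 1).getD 0 ≤
                    (PySem.List.pyGet? c 0).getD 0)
          then pvBt num (chosen ++ [c]) rs
          else [])
        else []) ++ pvBt num chosen rs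
  termination_by rest.length
  decreasing_by all_goals simp_all [Nat.lt_succ_iff]

def combin_list_alt (L : List (List Int)) (num : Int) : List (List (List Int)) :=
  if num < 0 || decide ((L.length : Int) < num) then [] else pvBt num [] L

-- ===== PRECONDITION & SPEC =====
-- Bool helpers for Pre_: is pair (s[k], s[k+1]) fully in range / in range and non-conflicting?
def pvPairIn (s : List (List Int)) (k : Nat) : Bool :=
  decide (2 ≤ (s.getD k []).length) && decide (1 ≤ (s.getD (k + 1) []).length)
def pvPairPass (s : List (List Int)) (k : Nat) : Bool :=
  pvPairIn s k && decide ((s.getD k []).getD 1 0 ≤ (s.getD (k + 1) []).getD 0 0)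
-- conflict_check(s) returns without IndexError: every pair reached before a conflict is in range
def pvSafeB (s : List (List Int)) : Bool :=
  (List.range (s.length - 1)).all (fun i => !((List.range i).all (pvPairPass s)) || pvPairIn s i)

-- Pre_ excludes exactly the inputs where A raises: num < 0 (combinations raises ValueError) and
-- inputs where some size-num combination reaches a short inner list before any conflict, so
-- conflict_check's lst[i][1]/lst[i+1][0] raises IndexError; it excludes NO input on which A returns.
def Pre_combin_list (L : List (List Int)) (num : Int) : Prop :=
  0 ≤ num ∧ (L.sublistsLen num.toNat).all pvSafeB = true
instance (L : List (List Int)) (num : Int) : Decidable (Pre_combin_list L num) := by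
  unfold Pre_combin_list; infer_instance
def pvWitness_combin_list : List (List Int) × Int := ([[0, 1], [2, 3]], 2)

def Spec_combin_list (L : List (List Int)) (num : Int) (out : List (List (List Int))) : Prop :=
  out = combin_list_alt L num
instance (L : List (List Int)) (num : Int) (out : List (List (List Int))) :
    Decidable (Spec_combin_list L num out) := by unfold Spec_combin_list; infer_instance

-- ===== CLAIM (what is proved, stated in full; the proofs are below) =====
def Claim_equal_combin_list : Prop := ∀ (L : List (List Int)) (num : Int),
  Dom_combin_list L num → Pre_combin_list L num → Spec_combin_list L num (combin_list L num)

-- ===== LEMMAS AND PROOFS =====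

-- adjacency check as structural recursion on the list
def pvAdjOk : List (List Int) → Bool
  | [] => true
  | [_] => true
  | a :: b :: t =>
    (!(decide ((PySem.List.pyGet? a 1).getD 0 > (PySem.List.pyGet? b 0).getD 0))) &&
      pvAdjOk (b :: t)

-- adjacency chain continuing from an optional last element
def pvChain : Option (List Int) → List (List Int) → Bool
  | _, [] => true
  | last, c :: cs =>
    (match last with
      | none => true
      | some p =>
        decide ((PySem.List.pyGet? p 1).getD 0 ≤ (PySem.List.pyGet? c 0).getD 0)) &&
      pvChain (some c) cs

theorem pvChain_some_eq_adjOk (c : List Int) (cs : List (List Int)) :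
    pvChain (some c) cs = pvAdjOk (c :: cs) := by
  induction cs generalizing c with
  | nil => rfl
  | cons b t ih =>
    simp [pvChain, pvAdjOk, ih b, ← decide_not, not_lt]

theorem pvChain_none_eq_adjOk (l : List (List Int)) : pvChain none l = pvAdjOk l := by
  cases l with
  | nil => rfl
  | cons c cs => simp [pvChain, pvChain_some_eq_adjOk]

theorem pvConflict_nat (lst : List (List Int)) :
    pvConflictCheck lst = (List.range (lst.length - 1)).all
      (fun k => !(decide ((PySem.List.pyGet? (lst.getD k []) 1).getD 0 >
                          (PySem.List.pyGet? (lst.getD (k + 1) []) 0).getD 0))) := by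
  unfold pvConflictCheck
  rw [PySem.List.pyRange_one, List.all_map]
  have hlen : ((lst.length : Int) - 1 - 0).toNat = lst.length - 1 := by omega
  rw [hlen]
  congr 1
  funext k
  simp only [Function.comp_apply]
  have h2 : (0 : Int) + (k : Int) + 1 = ((k + 1 : Nat) : Int) := by push_cast; ring
  rw [h2]
  have h1 : (0 : Int) + (k : Int) = ((k : Nat) : Int) := by push_cast; ring
  rw [h1]
  simp only [Function.comp, PySem.List.pyGet?_natCast, List.getD_eq_getElem?_getD]

theorem pvRangeAll_eq_adjOk : ∀ (lst : List (List Int)),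
    (List.range (lst.length - 1)).all
      (fun k => !(decide ((PySem.List.pyGet? (lst.getD k []) 1).getD 0 >
                          (PySem.List.pyGet? (lst.getD (k + 1) []) 0).getD 0))) = pvAdjOk lst
  | [] => rfl
  | [_] => rfl
  | a :: b :: t => by
    have ih := pvRangeAll_eq_adjOk (b :: t)
    have hl : (a :: b :: t).length - 1 = ((b :: t).length - 1) + 1 := by simp
    rw [hl, List.range_succ_eq_map, List.all_cons, List.all_map]
    have htail :
        ((fun k =>
            !(decide ((PySem.List.pyGet? ((a :: b :: t).getD k []) 1).getD 0 >
                      (PySem.List.pyGet? ((a :: b :: t).getD (k + 1) []) 0).getD 0))) ∘ Nat.succ) =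
        (fun k =>
            !(decide ((PySem.List.pyGet? ((b :: t).getD k []) 1).getD 0 >
                      (PySem.List.pyGet? ((b :: t).getD (k + 1) []) 0).getD 0))) := by
      funext k
      simp [Function.comp, List.getD_cons_succ]
    rw [htail, ih]
    rfl

theorem pvConflictCheck_eq_adjOk (lst : List (List Int)) :
    pvConflictCheck lst = pvAdjOk lst := by
  rw [pvConflict_nat, pvRangeAll_eq_adjOk]

theorem pvCombos_eq_nil (n : Nat) (L : List (List Int)) (h : L.length < n) :
    pvCombos n L = [] := by
  induction L generalizing n with
  | nil => cases n with
    | zero => omega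
    | succ m => rfl
  | cons x xs ih =>
    cases n with
    | zero => omega
    | succ m =>
      simp only [pvCombos, List.length_cons] at *
      rw [ih m (by omega), ih (m + 1) (by omega)]
      simp

theorem pvFoldlAppend (l acc : List (List (List Int))) :
    l.foldl (fun a i => a ++ [i]) acc = acc ++ l := by
  induction l generalizing acc with
  | nil => simp
  | cons x xs ih => simp [List.foldl_cons, ih]

theorem pvRemoveFirst (p s : List (List (List Int))) (a : List (List Int))
    (hp : ∀ x ∈ p, pvConflictCheck x = true) (ha : pvConflictCheck a = false) :
    PySem.List.remove? (p ++ a :: s) a = some (p ++ s) := by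
  induction p with
  | nil => simp
  | cons x xs ih =>
    have hx : x ≠ a := by
      intro h; subst h; rw [hp x (by simp)] at ha; exact absurd ha (by simp)
    have hih := ih (fun y hy => hp y (by simp [hy]))
    rw [List.cons_append, PySem.List.remove?_cons_of_ne _ hx, hih, Option.map_some]
    simp

theorem pvRemoveLoop (s p : List (List (List Int)))
    (hp : ∀ x ∈ p, pvConflictCheck x = true) :
    s.foldl
      (fun copy i =>
        if !pvConflictCheck i then (PySem.List.remove? copy i).getD copy else copy)
      (p ++ s) = p ++ s.filter pvConflictCheck := by
  induction s generalizing p with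
  | nil => simp
  | cons a s' ih =>
    simp only [List.foldl_cons]
    by_cases hA : pvConflictCheck a = true
    · rw [hA]
      simp only [Bool.not_true, Bool.false_eq_true, if_false]
      have hps : p ++ a :: s' = (p ++ [a]) ++ s' := by simp
      have hp' : ∀ x ∈ p ++ [a], pvConflictCheck x = true := by
        intro x hx
        rcases List.mem_append.mp hx with h | h
        · exact hp x h
        · simp only [List.mem_singleton] at h; subst h; exact hA
      rw [hps, ih (p ++ [a]) hp']
      simp [List.filter_cons, hA]
    · have hA' : pvConflictCheck a = false := by simpa using hA
      rw [hA']
      simp only [Bool.not_false, if_true, pvRemoveFirst p s' a hp hA', Option.getD_some]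
      rw [ih p hp]
      simp [List.filter_cons, hA']

theorem pvBt_guard (chosen : List (List Int)) (c : List Int) :
    (chosen.isEmpty ||
        decide ((PySem.List.pyGet? ((PySem.List.pyGet? chosen (-1)).getD []) 1).getD 0 ≤
                (PySem.List.pyGet? c 0).getD 0)) =
      (match chosen.getLast? with
        | none => true
        | some p =>
          decide ((PySem.List.pyGet? p 1).getD 0 ≤ (PySem.List.pyGet? c 0).getD 0)) := by
  rw [PySem.List.pyGet?_neg_one]
  cases h : chosen.getLast? with
  | none =>
    have hc : chosen = [] := by simpa using h
    subst hc; rfl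
  | some p =>
    have hne : chosen ≠ [] := by intro hc; subst hc; simp at h
    have hemp : chosen.isEmpty = false := by
      rw [Bool.eq_false_iff]
      intro hc
      exact hne (List.isEmpty_iff.mp hc)
    simp [hemp, h]

theorem pvBt_eq (num : Int) (rest chosen : List (List Int)) (k : Nat)
    (hk : (chosen.length : Int) + k = num) :
    pvBt num chosen rest =
      ((pvCombos k rest).filter (pvChain chosen.getLast?)).map (chosen ++ ·) := by
  induction rest generalizing chosen k with
  | nil =>
    cases k with
    | zero =>
      have h : (chosen.length : Int) = num := by omega
      rw [pvBt]; simp [h, pvCombos, pvChain]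
    | succ m =>
      have h : ¬ ((chosen.length : Int) = num) := by omega
      rw [pvBt]; simp [h, pvCombos]
  | cons c rs ih =>
    cases k with
    | zero =>
      have h : (chosen.length : Int) = num := by omega
      rw [pvBt]; simp [h, pvCombos, pvChain]
    | succ m =>
      have h : ¬ ((chosen.length : Int) = num) := by omega
      rw [pvBt, if_neg h, pvBt_guard chosen c]
      have hRHS : pvCombos (m + 1) (c :: rs) =
          (pvCombos m rs).map (c :: ·) ++ pvCombos (m + 1) rs := rfl
      rw [hRHS, List.filter_append, List.map_append]
      have hsnd := ih chosen (m + 1) hk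
      by_cases hroom : m ≤ rs.length
      · rw [if_pos (by simp; omega)]
        cases hB : (match chosen.getLast? with
          | none => true
          | some p =>
            decide ((PySem.List.pyGet? p 1).getD 0 ≤ (PySem.List.pyGet? c 0).getD 0)) with
        | false =>
          rw [if_neg (by simp [hB])]
          have hfil : ((pvCombos m rs).map (c :: ·)).filter (pvChain chosen.getLast?) = [] := by
            rw [List.filter_map]
            have : ∀ cs, pvChain chosen.getLast? (c :: cs) = false := by
              intro cs; simp [pvChain, hB]
            simp [Function.comp, this]
          rw [hfil, hsnd]
          simp
        | true =>
          rw [if_pos (by simp [hB])]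
          have hfst := ih (chosen ++ [c]) m (by simp; omega)
          rw [List.getLast?_concat] at hfst
          rw [hfst, List.filter_map]
          have hpt : (fun cs => pvChain chosen.getLast? (c :: cs)) = pvChain (some c) := by
            funext cs; simp [pvChain, hB]
          have hcomp : (pvChain chosen.getLast? ∘ (c :: ·)) = pvChain (some c) := by
            funext cs; simpa using congrFun hpt cs
          rw [hcomp, hsnd, List.map_map]
          have hmapf : ((fun x => chosen ++ x) ∘ (fun x => c :: x)) =
              (fun x => chosen ++ [c] ++ x) := by
            funext x; simp
          rw [hmapf]
      · -- pruned branch: not enough elements left, and pvCombos m rs = [] as well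
        rw [if_neg (by simp; omega)]
        rw [pvCombos_eq_nil m rs (by omega)]
        rw [hsnd]
        simp

theorem combin_list_eq_filter (L : List (List Int)) (num : Int) :
    combin_list L num = (pvCombos num.toNat L).filter pvConflictCheck := by
  unfold combin_list
  dsimp only
  rw [pvFoldlAppend]
  simpa using pvRemoveLoop (pvCombos num.toNat L) [] (by simp)

-- ===== VERDICT (by name: the statements are the Claim_ definitions above) =====
theorem combin_list_spec : Claim_equal_combin_list := by
  intro L num _hDom hPre
  obtain ⟨h0, -⟩ := hPre
  unfold Spec_combin_list
  rw [combin_list_eq_filter]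
  unfold combin_list_alt
  by_cases hbig : (L.length : Int) < num
  · rw [if_pos (by simp [hbig])]
    rw [pvCombos_eq_nil num.toNat L (by omega)]
    rfl
  · rw [if_neg (by simp; omega)]
    rw [pvBt_eq num L [] num.toNat (by simp; omega)]
    have hch : pvChain (List.getLast? ([] : List (List Int))) = pvConflictCheck := by
      funext l
      rw [show List.getLast? ([] : List (List Int)) = none from rfl,
        pvChain_none_eq_adjOk, ← pvConflictCheck_eq_adjOk]
    rw [hch]
    simp
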